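-- pv_equiv track=rewrite | github.com/Joel-tec26/IntroduccionProgra | ejercicio1.py | categorizarPalabras
-- ===== SOURCE A (Python) =====
-- def esPalindromo(palabra):
--     palabra = palabra.lower()
--     return len(palabra) > 1 and palabra == palabra[::-1]
--
-- def esInfinitivo(palabra):
--     terminaciones = ('ar', 'er', 'ir', 'or', 'ur')
--     return palabra.lower().endswith(terminaciones)
--
-- def categorizarPalabras(ptupla):
--     if not type(ptupla)==tuple:
--         return "Debe ingresar una tupla obligatoriamente"
--     infinitivos = []
--     palindromos = []
--     for frase in ptupla:
--         palabras=frase.lower().split()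
--         for i in palabras:
--             palabraLimpia=i.strip(",.-_:;´+}¨*]{[!#$%&/()=?'¿¡|°")
--             if esInfinitivo(palabraLimpia):
--                 infinitivos.append(palabraLimpia)
--             if esPalindromo(palabraLimpia):
--                 palindromos.append(palabraLimpia)
--     return [infinitivos,palindromos]
-- ===== SOURCE B (Python) =====
-- _STRIP = ",.-_:;´+}¨*]{[!#$%&/()=?'¿¡|°"
--
-- def _trim(cs):
--     # drop punctuation from both ends of the character list
--     while cs and cs[0] in _STRIP:
--         cs = cs[1:]
--     while cs and cs[-1] in _STRIP:
--         cs = cs[:-1]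
--     return cs
--
-- def _es_inf(w):
--     # infinitive <=> ends in vowel + 'r'  (w is already lowercase)
--     return len(w) >= 2 and w[-1] == 'r' and w[-2] in 'aeiou'
--
-- def _es_pal(w):
--     # two-pointer palindrome check (w is already lowercase)
--     if len(w) < 2:
--         return False
--     i, j = 0, len(w) - 1
--     while i < j:
--         if w[i] != w[j]:
--             return False
--         i += 1
--         j -= 1
--     return True
--
-- def categorizarPalabras(ptupla):
--     if not type(ptupla) == tuple:
--         return "Debe ingresar una tupla obligatoriamente"
--     infinitivos = []
--     palindromos = []
--     for frase in ptupla: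
--         cur = []
--         for c in frase.lower() + ' ':  # trailing blank flushes the last word
--             if c.isspace():
--                 if cur:
--                     w = _trim(cur)
--                     if _es_inf(w):
--                         infinitivos.append(''.join(w))
--                     if _es_pal(w):
--                         palindromos.append(''.join(w))
--                     cur = []
--             else:
--                 cur.append(c)
--     return [infinitivos, palindromos]
-- ===== Notes on version B (the rewrite author's own statement) =====
-- stated objective: alternative
-- what changed: B replaces A's library pipeline (lower/split per phrase, strip per word, tuple-endswith, string==reversed-string) by one hand-rolled character-level scan per phrase that accumulates and flushes words itself, trims punctuation with explicit while loops, tests the infinitive suffix arithmetically as vowel+'r' on the last two characters, and tests palindromes with a two-pointer loop.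
import Mathlib
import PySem

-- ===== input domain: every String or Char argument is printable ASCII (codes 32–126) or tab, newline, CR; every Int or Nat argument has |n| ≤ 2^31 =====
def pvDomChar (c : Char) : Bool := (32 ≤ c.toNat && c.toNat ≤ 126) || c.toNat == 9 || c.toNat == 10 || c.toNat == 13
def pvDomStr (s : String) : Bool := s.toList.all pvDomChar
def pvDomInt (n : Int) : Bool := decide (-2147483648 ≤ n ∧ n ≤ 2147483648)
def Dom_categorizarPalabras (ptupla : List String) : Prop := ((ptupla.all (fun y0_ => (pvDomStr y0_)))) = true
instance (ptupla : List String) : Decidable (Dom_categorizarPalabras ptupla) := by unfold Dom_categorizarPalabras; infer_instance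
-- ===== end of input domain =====

-- B replaces A's split/strip/endswith pipeline by a single character-level scan of each lowered
-- phrase (hand-rolled word flushing, end-trimming, arithmetic vowel+'r' suffix test, two-pointer
-- palindrome test); alternative decomposition, same cost. The Python-level `type(ptupla)==tuple`
-- guard is unreachable under the List String signature and is not ported.

-- ===== PORT A =====
-- the exact strip character set of A
def pvStripSet : String := ",.-_:;´+}¨*]{[!#$%&/()=?'¿¡|°"

-- esPalindromo: p.lower(); len > 1 and p == p[::-1]  (s[::-1] is reverse)
def esPalindromo (palabra : String) : Bool :=
  let p := PySem.Str.lower palabra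
  decide (1 < PySem.Str.len p) && (p.toList == p.toList.reverse)

-- esInfinitivo: endswith on a tuple is the ordered disjunction of the five suffix tests
def esInfinitivo (palabra : String) : Bool :=
  let p := PySem.Str.lower palabra
  PySem.Str.endswith p "ar" || PySem.Str.endswith p "er" || PySem.Str.endswith p "ir" ||
  PySem.Str.endswith p "or" || PySem.Str.endswith p "ur"

def categorizarPalabras (ptupla : List String) : List (List String) :=
  let st := ptupla.foldl
    (fun (st : List String × List String) frase =>
      (PySem.Str.split₀ (PySem.Str.lower frase)).foldl
        (fun st i =>
          let palabraLimpia := PySem.Str.stripChars i pvStripSet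
          let st := if esInfinitivo palabraLimpia then (st.1 ++ [palabraLimpia], st.2) else st
          if esPalindromo palabraLimpia then (st.1, st.2 ++ [palabraLimpia]) else st)
        st)
    ([], [])
  [st.1, st.2]

-- ===== PORT B =====
-- `c in _STRIP` for a single character c is the character-membership test
def pvStripP (c : Char) : Bool := pvStripSet.toList.contains c

-- _trim, first while loop: while cs and cs[0] in _STRIP: cs = cs[1:]
def pvTrimL : List Char → List Char
  | [] => []
  | c :: rest => if pvStripP c then pvTrimL rest else c :: rest

-- _trim, second while loop: while cs and cs[-1] in _STRIP: cs = cs[:-1]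
def pvTrimR (cs : List Char) : List Char :=
  if h : cs = [] then cs
  else if pvStripP (cs.getLast h) then pvTrimR cs.dropLast else cs
termination_by cs.length
decreasing_by
  rw [List.length_dropLast]
  have := List.length_pos_iff.mpr h
  omega

def pvTrim (cs : List Char) : List Char := pvTrimR (pvTrimL cs)

-- `w[-2] in 'aeiou'` for the single character w[-2] is character membership
def pvVowel (c : Char) : Bool := "aeiou".toList.contains c

-- _es_inf: len(w) >= 2 and w[-1] == 'r' and w[-2] in 'aeiou'  (short-circuit `and` = Bool &&)
def pvEsInf (w : List Char) : Bool :=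
  decide (2 ≤ w.length) && (PySem.List.pyGet? w (-1) == some 'r') &&
    ((PySem.List.pyGet? w (-2)).elim false pvVowel)

-- _es_pal inner while loop (two pointers)
def pvPalGo (w : List Char) (i j : Nat) : Bool :=
  if i < j then
    if PySem.List.pyGet? w (i : Int) ≠ PySem.List.pyGet? w (j : Int) then false
    else pvPalGo w (i + 1) (j - 1)
  else true
termination_by j - i

-- _es_pal: early return for len < 2, then the two-pointer loop
def pvEsPal (w : List Char) : Bool :=
  if w.length < 2 then false else pvPalGo w 0 (w.length - 1)

-- the body under `if cur:`: trim, then the two conditional appends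
def pvFlush (cur : List Char) (st : List String × List String) : List String × List String :=
  let w := pvTrim cur
  let st := if pvEsInf w then (st.1 ++ [String.ofList w], st.2) else st
  if pvEsPal w then (st.1, st.2 ++ [String.ofList w]) else st

-- one step of the character scan
def pvScanStep (st : List Char × List String × List String) (c : Char) :
    List Char × List String × List String :=
  if PySem.Chars.isspace c then
    if st.1.isEmpty then st else ([], pvFlush st.1 st.2)
  else (st.1 ++ [c], st.2)

def categorizarPalabras_alt (ptupla : List String) : List (List String) :=
  let st := ptupla.foldl
    (fun (acc : List String × List String) frase =>
      ((((PySem.Str.lower frase).toList ++ [' '])).foldl pvScanStep ([], acc)).2)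
    ([], [])
  [st.1, st.2]

-- ===== PRECONDITION & SPEC =====
def Spec_categorizarPalabras (ptupla : List String) (out : List (List String)) : Prop := out = categorizarPalabras_alt ptupla
instance (ptupla : List String) (out : List (List String)) : Decidable (Spec_categorizarPalabras ptupla out) := by unfold Spec_categorizarPalabras; infer_instance

-- ===== CLAIM (what is proved, stated in full; the proofs are below) =====
def Claim_equal_categorizarPalabras : Prop := ∀ (ptupla : List String), Dom_categorizarPalabras ptupla → Spec_categorizarPalabras ptupla (categorizarPalabras ptupla)

-- ===== LEMMAS AND PROOFS =====

-- lowering is idempotent character by character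
theorem pv_lowerChar_idem (c : Char) :
    PySem.Chars.lowerChar (PySem.Chars.lowerChar c) = PySem.Chars.lowerChar c := by
  simp only [PySem.Chars.lowerChar, PySem.Chars.isupper]
  by_cases h1 : 'A' ≤ c
  · by_cases h2 : c ≤ 'Z'
    · have hA : 65 ≤ c.toNat := by rw [Char.le_def] at h1; exact h1
      have hZ : c.toNat ≤ 90 := by rw [Char.le_def] at h2; exact h2
      have hval : (c.toNat + 32).isValidChar := by left; omega
      have htn : (Char.ofNat (c.toNat + 32)).toNat = c.toNat + 32 := by
        rw [Char.toNat_ofNat]; simp [hval]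
      have hle : ¬ (Char.ofNat (c.toNat + 32) ≤ 'Z') := by
        intro hcon
        have h3 : (Char.ofNat (c.toNat + 32)).toNat ≤ 90 := hcon
        omega
      simp [h1, h2, hle]
    · simp [h2]
  · simp [h1]

-- the first while loop of _trim is dropWhile
theorem pv_trimL_eq (cs : List Char) : pvTrimL cs = cs.dropWhile pvStripP := by
  induction cs with
  | nil => rfl
  | cons c rest ih =>
    by_cases h : pvStripP c <;> simp [pvTrimL, List.dropWhile, h, ih]

theorem pv_trimR_nil : pvTrimR [] = [] := by simp [pvTrimR]

theorem pv_trimR_concat (xs : List Char) (c : Char) :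
    pvTrimR (xs ++ [c]) = if pvStripP c then pvTrimR xs else xs ++ [c] := by
  rw [pvTrimR]
  simp [List.getLast_concat, List.dropLast_concat]

-- the second while loop of _trim drops the trailing strip characters
theorem pv_trimR_eq (cs : List Char) : pvTrimR cs = (cs.reverse.dropWhile pvStripP).reverse := by
  induction cs using List.reverseRecOn with
  | nil => simp [pv_trimR_nil]
  | append_singleton xs c ih =>
    rw [pv_trimR_concat]
    by_cases h : pvStripP c <;> simp [h, List.dropWhile, ih]

-- _trim is exactly Python's str.strip(chars)
theorem pv_trim_eq (cs : List Char) :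
    pvTrim cs = PySem.Chars.stripChars cs pvStripSet.toList := by
  simp only [pvTrim, pv_trimL_eq, pv_trimR_eq, PySem.Chars.stripChars]
  rfl

-- split₀.go only prepends to its accumulator
theorem pv_go_acc (cs cur : List Char) (acc : List (List Char)) :
    PySem.Chars.split₀.go cs cur acc = acc.reverse ++ PySem.Chars.split₀.go cs cur [] := by
  induction cs generalizing cur acc with
  | nil =>
    by_cases h : cur.isEmpty <;> simp [PySem.Chars.split₀.go, h]
  | cons c rest ih =>
    by_cases hs : PySem.Chars.isspace c
    · by_cases hc : cur.isEmpty
      · simp only [PySem.Chars.split₀.go, hs, hc, if_true]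
        exact ih [] acc
      · simp only [PySem.Chars.split₀.go, hs, hc, if_true, if_false, Bool.false_eq_true]
        rw [ih _ (cur.reverse :: acc), ih _ [cur.reverse]]
        simp
    · simp only [PySem.Chars.split₀.go, hs, Bool.false_eq_true, if_false]
      exact ih _ acc

-- the character scan of B flushes exactly the words split₀ produces
theorem pv_scan (cs cur : List Char) (acc : List String × List String) :
    (cs ++ [' ']).foldl pvScanStep (cur, acc)
      = ([], (PySem.Chars.split₀.go cs cur.reverse []).foldl (fun st t => pvFlush t st) acc) := by
  induction cs generalizing cur acc with
  | nil =>
    have hsp : PySem.Chars.isspace ' ' = true := by decide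
    by_cases h : cur.isEmpty
    · have : cur = [] := List.isEmpty_iff.mp h
      simp [this, pvScanStep, hsp, PySem.Chars.split₀.go]
    · have hrev : cur.reverse.isEmpty = false := by
        simp only [List.isEmpty_eq_false_iff] at h ⊢; simpa using h
      simp [pvScanStep, hsp, h, PySem.Chars.split₀.go, hrev]
  | cons c rest ih =>
    simp only [List.cons_append, List.foldl_cons]
    by_cases hs : PySem.Chars.isspace c
    · by_cases hc : cur.isEmpty
      · have hcur : cur = [] := List.isEmpty_iff.mp hc
        simp only [pvScanStep, hs, if_true, hc, hcur, List.isEmpty_nil]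
        rw [ih [] acc]
        simp [PySem.Chars.split₀.go, hs]
      · have hrev : cur.reverse.isEmpty = false := by
          simp only [List.isEmpty_eq_false_iff] at hc ⊢; simpa using hc
        simp only [pvScanStep, hs, if_true, hc, Bool.false_eq_true, if_false]
        rw [ih [] (pvFlush cur acc)]
        simp only [PySem.Chars.split₀.go, hs, hrev, Bool.false_eq_true, if_false, if_true,
          List.reverse_nil]
        rw [pv_go_acc _ _ [cur.reverse.reverse]]
        simp
    · simp only [pvScanStep, hs, Bool.false_eq_true, if_false]
      rw [ih (cur ++ [c]) acc]
      simp [PySem.Chars.split₀.go, hs]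

-- folding pvFlush over the words = the two filtered lists of the trimmed words
theorem pv_flush_fold (toks : List (List Char)) (a b : List String) :
    toks.foldl (fun st t => pvFlush t st) (a, b)
      = (a ++ ((toks.map (fun t => String.ofList (pvTrim t))).filter (fun s => pvEsInf s.toList)),
         b ++ ((toks.map (fun t => String.ofList (pvTrim t))).filter (fun s => pvEsPal s.toList))) := by
  induction toks generalizing a b with
  | nil => simp
  | cons t ts ih =>
    have hf : pvFlush t (a, b) =
        ((if pvEsInf (pvTrim t) then a ++ [String.ofList (pvTrim t)] else a),
         (if pvEsPal (pvTrim t) then b ++ [String.ofList (pvTrim t)] else b)) := by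
      simp only [pvFlush]
      by_cases h1 : pvEsInf (pvTrim t) <;> by_cases h2 : pvEsPal (pvTrim t) <;> simp [h1, h2]
    rw [List.foldl_cons, hf]
    by_cases h1 : pvEsInf (pvTrim t) <;> by_cases h2 : pvEsPal (pvTrim t) <;>
      simp only [h1, h2, if_true, if_false, Bool.false_eq_true] <;>
      rw [ih] <;> simp [h1, h2]

theorem pv_pyGet_neg_one (xs : List Char) (c : Char) :
    PySem.List.pyGet? (xs ++ [c]) (-1) = some c := by
  simp [PySem.List.pyGet?, PySem.List.pyIdx?]

theorem pv_pyGet_neg_two (xs : List Char) (v c : Char) :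
    PySem.List.pyGet? ((xs ++ [v]) ++ [c]) (-2) = some v := by
  simp [PySem.List.pyGet?, PySem.List.pyIdx?]

set_option maxRecDepth 8192 in

theorem pvVowel_eq (v : Char) :
    pvVowel v = (v == 'a' || v == 'e' || v == 'i' || v == 'o' || v == 'u') := by
  have h : "aeiou".toList = ['a','e','i','o','u'] := rfl
  simp [pvVowel, h]
  simp only [Bool.or_assoc]
  rfl

theorem pv_esInf_chars (w : List Char) :
    pvEsInf w = (PySem.Chars.endswith w ['a','r'] || PySem.Chars.endswith w ['e','r'] ||
      PySem.Chars.endswith w ['i','r'] || PySem.Chars.endswith w ['o','r'] ||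
      PySem.Chars.endswith w ['u','r']) := by
  induction w using List.reverseRecOn with
  | nil => decide
  | append_singleton xs c _ =>
    induction xs using List.reverseRecOn with
    | nil =>
      simp [pvEsInf, PySem.Chars.endswith, List.isSuffixOf, List.isPrefixOf]
    | append_singleton ys v _ =>
      have h1 := pv_pyGet_neg_one (ys ++ [v]) c
      have h2 := pv_pyGet_neg_two ys v c
      simp only [pvEsInf, h1, h2, PySem.Chars.endswith, List.isSuffixOf, List.reverse_append,
        List.reverse_cons, List.reverse_nil, List.nil_append, List.cons_append,
        List.isPrefixOf, Option.elim_some]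
      simp only [List.length_append, List.length_cons, List.length_nil]
      have hl : (decide (2 ≤ ys.length + 1 + 1)) = true := by
        simp
      simp only [hl, Bool.true_and]
      by_cases hc : c = 'r'
      · subst hc
        simp only [pvVowel_eq]
        by_cases hv : v = 'a' <;> by_cases hv2 : v = 'e' <;> by_cases h3 : v = 'i' <;>
          by_cases h4 : v = 'o' <;> by_cases h5 : v = 'u' <;>
          simp [hv, hv2, h3, h4, h5, eq_comm, BEq.comm]
      · have hb1 : ('r' == c) = false := by
          simp only [beq_eq_false_iff_ne, ne_eq]; exact fun h => hc h.symm
        have hb2 : (c == 'r') = false := by simpa using hc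
        simp [hb1, hb2]

theorem pv_palGo_spec (w : List Char) (i j : Nat) :
    pvPalGo w i j = decide (∀ k, i ≤ k → k ≤ j → w[k]? = w[i + j - k]?) := by
  induction i, j using pvPalGo.induct w with
  | case1 i j hij hne =>
    rw [pvPalGo]
    simp only [hij, if_true, hne, ne_eq, not_true_eq_false, if_true]
    have : ¬ (∀ k, i ≤ k → k ≤ j → w[k]? = w[i + j - k]?) := by
      intro hall
      have hk := hall i le_rfl (le_of_lt hij)
      rw [show i + j - i = j by omega] at hk
      rw [PySem.List.pyGet?_natCast, PySem.List.pyGet?_natCast] at hne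
      exact hne hk
    simp [this]
  | case2 i j hij heq ih =>
    rw [pvPalGo]
    rw [PySem.List.pyGet?_natCast, PySem.List.pyGet?_natCast] at heq
    simp only [ne_eq, not_not] at heq
    simp only [hij, if_true, PySem.List.pyGet?_natCast, heq, ne_eq, not_true_eq_false,
      Bool.false_eq_true, if_false]
    rw [ih]
    have hiff : (∀ k, i + 1 ≤ k → k ≤ j - 1 → w[k]? = w[i + 1 + (j - 1) - k]?)
        ↔ (∀ k, i ≤ k → k ≤ j → w[k]? = w[i + j - k]?) := by
      constructor
      · intro h k hik hkj
        by_cases hk1 : k = i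
        · rw [hk1, show i + j - i = j by omega]; exact heq
        · by_cases hk2 : k = j
          · rw [hk2, show i + j - j = i by omega]; exact heq.symm
          · have := h k (by omega) (by omega)
            rw [show i + 1 + (j - 1) - k = i + j - k by omega] at this
            exact this
      · intro h k hik hkj
        have := h k (by omega) (by omega)
        rw [show i + j - k = i + 1 + (j - 1) - k by omega] at this
        exact this
    simp only [decide_eq_decide]
    exact hiff
  | case3 i j hij =>
    rw [pvPalGo]
    simp only [hij, if_false, Bool.false_eq_true]
    have : (∀ k, i ≤ k → k ≤ j → w[k]? = w[i + j - k]?) := by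
      intro k hik hkj
      rw [show i + j - k = k by omega]
    exact (decide_eq_true this).symm

theorem pv_esPal_chars (w : List Char) :
    pvEsPal w = (decide (1 < w.length) && (w == w.reverse)) := by
  by_cases h : w.length < 2
  · have h1 : ¬ (1 < w.length) := by omega
    simp [pvEsPal, h, h1]
  · have h1 : (1 < w.length) := by omega
    have hiff : (∀ k, 0 ≤ k → k ≤ w.length - 1 → w[k]? = w[0 + (w.length - 1) - k]?)
        ↔ w = w.reverse := by
      constructor
      · intro hall
        apply List.ext_getElem?
        intro i
        by_cases hi : i < w.length
        · rw [List.getElem?_reverse hi]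
          have := hall i (Nat.zero_le i) (by omega)
          rw [show 0 + (w.length - 1) - i = w.length - 1 - i by omega] at this
          exact this
        · rw [List.getElem?_eq_none (by omega), List.getElem?_eq_none (by simp; omega)]
      · intro hw k _ hk
        have hklt : k < w.length := by omega
        rw [show 0 + (w.length - 1) - k = w.length - 1 - k by omega]
        rw [← List.getElem?_reverse hklt, ← hw]
    simp only [pvEsPal, h, if_false, h1, decide_true, Bool.true_and]
    rw [pv_palGo_spec]
    rw [Bool.eq_iff_iff]
    simp only [decide_eq_true_eq, beq_iff_eq]
    exact hiff

-- every character of every word split₀.go produces comes from the input, the pending word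
-- or the accumulator
theorem pv_go_mem (cs cur : List Char) (acc : List (List Char)) (t : List Char)
    (ht : t ∈ PySem.Chars.split₀.go cs cur acc) (c : Char) (hc : c ∈ t) :
    c ∈ cs ∨ c ∈ cur ∨ ∃ t' ∈ acc, c ∈ t' := by
  induction cs generalizing cur acc with
  | nil =>
    by_cases h : cur.isEmpty
    · simp only [PySem.Chars.split₀.go, h, if_true, List.mem_reverse] at ht
      exact Or.inr (Or.inr ⟨t, ht, hc⟩)
    · simp only [PySem.Chars.split₀.go, h, Bool.false_eq_true, if_false, List.reverse_cons,
        List.mem_append, List.mem_reverse, List.mem_singleton] at ht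
      rcases ht with ht | ht
      · exact Or.inr (Or.inr ⟨t, ht, hc⟩)
      · subst ht
        exact Or.inr (Or.inl (List.mem_reverse.mp hc))
  | cons c0 rest ih =>
    by_cases hs : PySem.Chars.isspace c0
    · by_cases hcu : cur.isEmpty
      · simp only [PySem.Chars.split₀.go, hs, hcu, if_true] at ht
        rcases ih [] acc ht with h | h | h
        · exact Or.inl (List.mem_cons_of_mem _ h)
        · simp at h
        · exact Or.inr (Or.inr h)
      · simp only [PySem.Chars.split₀.go, hs, hcu, if_true, Bool.false_eq_true, if_false] at ht
        rcases ih [] (cur.reverse :: acc) ht with h | h | ⟨t', ht', hc'⟩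
        · exact Or.inl (List.mem_cons_of_mem _ h)
        · simp at h
        · rcases List.mem_cons.mp ht' with h | h
          · subst h
            exact Or.inr (Or.inl (List.mem_reverse.mp hc'))
          · exact Or.inr (Or.inr ⟨t', h, hc'⟩)
    · simp only [PySem.Chars.split₀.go, hs, Bool.false_eq_true, if_false] at ht
      rcases ih (c0 :: cur) acc ht with h | h | h
      · exact Or.inl (List.mem_cons_of_mem _ h)
      · rcases List.mem_cons.mp h with h | h
        · exact Or.inl (h ▸ List.mem_cons_self)
        · exact Or.inr (Or.inl h)
      · exact Or.inr (Or.inr h)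

-- every character of a word of split₀ (lower xs) is fixed under lowering
theorem pv_token_fixed (xs t : List Char)
    (ht : t ∈ PySem.Chars.split₀ (PySem.Chars.lower xs)) :
    ∀ c ∈ t, PySem.Chars.lowerChar c = c := by
  intro c hc
  rcases pv_go_mem (PySem.Chars.lower xs) [] [] t ht c hc with h | h | h
  · rcases List.mem_map.mp h with ⟨d, _, hd⟩
    rw [← hd, pv_lowerChar_idem]
  · simp at h
  · simp at h

-- characters survive stripChars
theorem pv_stripChars_subset (t chs : List Char) (c : Char)
    (hc : c ∈ PySem.Chars.stripChars t chs) : c ∈ t := by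
  simp only [PySem.Chars.stripChars, List.mem_reverse] at hc
  have h1 := (List.dropWhile_sublist (fun c => chs.contains c)).mem hc
  rw [List.mem_reverse] at h1
  exact (List.dropWhile_sublist (fun c => chs.contains c)).mem h1

-- a word all of whose characters are fixed is fixed under lowering
theorem pv_lower_fixed (w : List Char) (h : ∀ c ∈ w, PySem.Chars.lowerChar c = c) :
    PySem.Chars.lower w = w := by
  simp only [PySem.Chars.lower]
  rw [List.map_congr_left h]
  simp

-- on lowering-fixed words, B's suffix test agrees with A's esInfinitivo
theorem pv_esInf_eq (w : List Char) (h : PySem.Chars.lower w = w) :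
    esInfinitivo (String.ofList w) = pvEsInf w := by
  simp only [esInfinitivo, PySem.Str.endswith, PySem.Str.toList_lower, String.toList_ofList, h]
  rw [pv_esInf_chars]
  rfl

-- on lowering-fixed words, B's two-pointer test agrees with A's esPalindromo
theorem pv_esPal_eq (w : List Char) (h : PySem.Chars.lower w = w) :
    esPalindromo (String.ofList w) = pvEsPal w := by
  simp only [esPalindromo, PySem.Str.len, PySem.Str.lower, String.toList_ofList, h]
  rw [pv_esPal_chars]
  simp [Nat.one_lt_cast]

-- A's inner word loop: two conditional appends = append of the two filters
theorem pv_inner (ws : List String) (a b : List String) :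
    ws.foldl
      (fun (st : List String × List String) i =>
        let palabraLimpia := PySem.Str.stripChars i pvStripSet
        let st := if esInfinitivo palabraLimpia then (st.1 ++ [palabraLimpia], st.2) else st
        if esPalindromo palabraLimpia then (st.1, st.2 ++ [palabraLimpia]) else st)
      (a, b)
    = (a ++ (ws.map (fun w => PySem.Str.stripChars w pvStripSet)).filter esInfinitivo,
       b ++ (ws.map (fun w => PySem.Str.stripChars w pvStripSet)).filter esPalindromo) := by
  induction ws generalizing a b with
  | nil => simp
  | cons w ws ih =>
    simp only [List.foldl_cons, List.map_cons, List.filter_cons]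
    by_cases h1 : esInfinitivo (PySem.Str.stripChars w pvStripSet) <;>
      by_cases h2 : esPalindromo (PySem.Str.stripChars w pvStripSet) <;>
      simp [h1, h2, ih]

-- A's nested loops = the two filters of the cleaned word list
theorem pv_outer (ps : List String) (a b : List String) :
    ps.foldl
      (fun (st : List String × List String) frase =>
        (PySem.Str.split₀ (PySem.Str.lower frase)).foldl
          (fun st i =>
            let palabraLimpia := PySem.Str.stripChars i pvStripSet
            let st := if esInfinitivo palabraLimpia then (st.1 ++ [palabraLimpia], st.2) else st
            if esPalindromo palabraLimpia then (st.1, st.2 ++ [palabraLimpia]) else st)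
          st)
      (a, b)
    = (a ++ ((ps.flatMap (fun frase => (PySem.Str.split₀ (PySem.Str.lower frase)).map
              (fun w => PySem.Str.stripChars w pvStripSet))).filter esInfinitivo),
       b ++ ((ps.flatMap (fun frase => (PySem.Str.split₀ (PySem.Str.lower frase)).map
              (fun w => PySem.Str.stripChars w pvStripSet))).filter esPalindromo)) := by
  induction ps generalizing a b with
  | nil => simp
  | cons p ps ih =>
    simp only [List.foldl_cons, List.flatMap_cons, List.filter_append]
    rw [pv_inner, ih]
    simp [List.append_assoc]

-- a fold of per-phrase folds is a fold over the flattened words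
theorem pv_foldl_flatMap {α β γ : Type} (g : α → List β) (h : γ → β → γ)
    (ps : List α) (acc : γ) :
    ps.foldl (fun a f => (g f).foldl h a) acc = (ps.flatMap g).foldl h acc := by
  induction ps generalizing acc with
  | nil => rfl
  | cons p ps ih => simp [List.foldl_append, ih]

-- closed form of A
theorem pv_a_char (ptupla : List String) :
    categorizarPalabras ptupla
      = [(ptupla.flatMap (fun frase => (PySem.Str.split₀ (PySem.Str.lower frase)).map
            (fun w => PySem.Str.stripChars w pvStripSet))).filter esInfinitivo,
         (ptupla.flatMap (fun frase => (PySem.Str.split₀ (PySem.Str.lower frase)).map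
            (fun w => PySem.Str.stripChars w pvStripSet))).filter esPalindromo] := by
  simp only [categorizarPalabras]
  rw [pv_outer]
  simp

-- closed form of B
theorem pv_alt_char (ptupla : List String) :
    categorizarPalabras_alt ptupla
      = [((ptupla.flatMap (fun f => PySem.Chars.split₀ (PySem.Chars.lower f.toList))).map
            (fun t => String.ofList (pvTrim t))).filter (fun s => pvEsInf s.toList),
         ((ptupla.flatMap (fun f => PySem.Chars.split₀ (PySem.Chars.lower f.toList))).map
            (fun t => String.ofList (pvTrim t))).filter (fun s => pvEsPal s.toList)] := by
  simp only [categorizarPalabras_alt]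
  have hB : (fun (acc : List String × List String) (frase : String) =>
        ((((PySem.Str.lower frase).toList ++ [' '])).foldl pvScanStep ([], acc)).2)
      = (fun (acc : List String × List String) (frase : String) =>
        (PySem.Chars.split₀ (PySem.Chars.lower frase.toList)).foldl
          (fun st t => pvFlush t st) acc) := by
    funext acc frase
    rw [pv_scan]
    simp [PySem.Chars.split₀, PySem.Str.toList_lower]
  rw [hB]
  rw [pv_foldl_flatMap (fun f => PySem.Chars.split₀ (PySem.Chars.lower f.toList))
    (fun st t => pvFlush t st) ptupla (([], []) : List String × List String)]
  rw [pv_flush_fold]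
  simp

-- A's cleaned word list = B's trimmed word list
theorem pv_clean_eq (ptupla : List String) :
    ptupla.flatMap (fun frase => (PySem.Str.split₀ (PySem.Str.lower frase)).map
        (fun w => PySem.Str.stripChars w pvStripSet))
    = (ptupla.flatMap (fun f => PySem.Chars.split₀ (PySem.Chars.lower f.toList))).map
        (fun t => String.ofList (pvTrim t)) := by
  rw [List.map_flatMap]
  congr 1
  funext f
  simp [PySem.Str.split₀, PySem.Str.stripChars, List.map_map, Function.comp, pv_trim_eq,
    PySem.Str.toList_lower]

-- the predicates agree on every word the scan produces
theorem pv_pred_eq (ptupla : List String) (s : String)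
    (hs : s ∈ (ptupla.flatMap (fun f => PySem.Chars.split₀ (PySem.Chars.lower f.toList))).map
        (fun t => String.ofList (pvTrim t))) :
    esInfinitivo s = pvEsInf s.toList ∧ esPalindromo s = pvEsPal s.toList := by
  rcases List.mem_map.mp hs with ⟨t, htmem, rfl⟩
  rcases List.mem_flatMap.mp htmem with ⟨f, _, htok⟩
  have hfix : ∀ c ∈ pvTrim t, PySem.Chars.lowerChar c = c := by
    intro c hc
    rw [pv_trim_eq] at hc
    exact pv_token_fixed f.toList t htok c (pv_stripChars_subset t _ c hc)
  have hlow := pv_lower_fixed _ hfix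
  constructor
  · rw [String.toList_ofList]
    exact pv_esInf_eq _ hlow
  · rw [String.toList_ofList]
    exact pv_esPal_eq _ hlow

-- ===== VERDICT (by name: the statement is the Claim_ definition above) =====
theorem categorizarPalabras_spec : Claim_equal_categorizarPalabras := by
  intro ptupla _
  show categorizarPalabras ptupla = categorizarPalabras_alt ptupla
  rw [pv_a_char, pv_alt_char, pv_clean_eq]
  rw [List.filter_congr (fun s hsm => (pv_pred_eq ptupla s hsm).1),
      List.filter_congr (fun s hsm => (pv_pred_eq ptupla s hsm).2)]
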